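-- pv_equiv track=rewrite | github.com/wbsljy/OCR | services/ocr_client.py | _match_result
-- ===== SOURCE A (Python) =====
-- def _match_result(results: list[dict], file_name: str, data_id: str) -> dict | None:
--     for result in results:
--         if result.get("data_id") == data_id:
--             return result
--     for result in results:
--         if result.get("file_name") == file_name:
--             return result
--     return results[0] if results else None
-- ===== SOURCE B (Python) =====
-- def _match_result(results: list[dict], file_name: str, data_id: str) -> dict | None:
--     def rank(r):
--         if r.get("data_id") == data_id:
--             return 0
--         if r.get("file_name") == file_name:
--             return 1
--         return 2
--     return min(results, key=rank) if results else None
-- ===== Notes on version B (the rewrite author's own statement) =====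
-- stated objective: idiomatic
-- what changed: Replaces A's two sequential scans plus fallback by a single stable min() over the list with a 3-level priority key (data_id match < file_name match < anything); min's first-minimum rule reproduces A's priority and tie-breaking.
import Mathlib
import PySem

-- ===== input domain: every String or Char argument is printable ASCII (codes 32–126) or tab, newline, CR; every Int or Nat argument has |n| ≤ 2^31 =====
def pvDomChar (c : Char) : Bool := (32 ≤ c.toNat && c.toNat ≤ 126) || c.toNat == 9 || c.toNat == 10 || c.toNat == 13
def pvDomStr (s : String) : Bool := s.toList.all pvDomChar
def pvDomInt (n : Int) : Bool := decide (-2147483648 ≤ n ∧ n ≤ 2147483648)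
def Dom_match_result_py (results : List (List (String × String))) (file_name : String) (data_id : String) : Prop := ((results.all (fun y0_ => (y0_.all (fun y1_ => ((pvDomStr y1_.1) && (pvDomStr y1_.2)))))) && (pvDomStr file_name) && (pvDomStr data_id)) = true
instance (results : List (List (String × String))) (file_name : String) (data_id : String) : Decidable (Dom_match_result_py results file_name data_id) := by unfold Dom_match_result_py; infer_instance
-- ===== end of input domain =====

-- B replaces A's two sequential scans plus fallback by one stable min() with a
-- 3-level priority key (idiomatic decomposition, same cost).

-- ===== PORT A =====
-- first loop: return the first result whose "data_id" entry equals data_id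
def pvALoop1 (data_id : String) : List (List (String × String)) → Option (List (String × String))
  | [] => none
  | r :: rest =>
    if PySem.Dict.get? ⟨r⟩ "data_id" == some data_id then some r
    else pvALoop1 data_id rest

-- second loop: return the first result whose "file_name" entry equals file_name
def pvALoop2 (file_name : String) : List (List (String × String)) → Option (List (String × String))
  | [] => none
  | r :: rest =>
    if PySem.Dict.get? ⟨r⟩ "file_name" == some file_name then some r
    else pvALoop2 file_name rest

def match_result_py (results : List (List (String × String))) (file_name : String) (data_id : String) : Option (List (String × String)) :=
  match pvALoop1 data_id results with
  | some r => some r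
  | none =>
    match pvALoop2 file_name results with
    | some r => some r
    | none =>
      -- `results[0] if results else None`
      match results with
      | [] => none
      | r :: _ => some r

-- ===== PORT B =====
-- B's key: 0 for a data_id match, 1 for a file_name match, 2 otherwise
def pvRank (file_name data_id : String) (r : List (String × String)) : Nat :=
  if PySem.Dict.get? ⟨r⟩ "data_id" == some data_id then 0
  else if PySem.Dict.get? ⟨r⟩ "file_name" == some file_name then 1
  else 2

-- `min(results, key=rank) if results else None`; PySem.List.min? is Python's min (first minimum wins)
def match_result_py_alt (results : List (List (String × String))) (file_name : String) (data_id : String) : Option (List (String × String)) :=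
  if results.isEmpty then none
  else PySem.List.min? results (pvRank file_name data_id)

-- ===== PRECONDITION & SPEC =====
def Spec_match_result_py (results : List (List (String × String))) (file_name : String) (data_id : String) (out : Option (List (String × String))) : Prop := out = match_result_py_alt results file_name data_id
instance (results : List (List (String × String))) (file_name : String) (data_id : String) (out : Option (List (String × String))) : Decidable (Spec_match_result_py results file_name data_id out) := by unfold Spec_match_result_py; infer_instance

-- ===== CLAIM (what is proved, stated in full; the proofs are below) =====
def Claim_equal_match_result_py : Prop := ∀ (results : List (List (String × String))) (file_name : String) (data_id : String), Dom_match_result_py results file_name data_id → Spec_match_result_py results file_name data_id (match_result_py results file_name data_id)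

-- ===== LEMMAS AND PROOFS =====
-- the running-minimum step of PySem.List.min?, written as a named function
def pvStep (file_name data_id : String)
    (acc : Option (List (String × String))) (x : List (String × String)) :
    Option (List (String × String)) :=
  match acc with
  | none => some x
  | some b => if pvRank file_name data_id x < pvRank file_name data_id b then some x else some b

theorem min?_eq_foldl_pvStep (file_name data_id : String)
    (xs : List (List (String × String))) :
    PySem.List.min? xs (pvRank file_name data_id) =
      List.foldl (pvStep file_name data_id) none xs := by
  have hf : (fun (acc : Option (List (String × String))) (x : List (String × String)) =>
      match acc with
      | none => some x
      | some m =>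
        if pvRank file_name data_id x < pvRank file_name data_id m then some x else some m) =
      pvStep file_name data_id := by
    funext acc x; cases acc <;> rfl
  simp only [PySem.List.min?]
  refine List.foldl_ext _ _ _ (fun acc x _ => ?_)
  cases acc <;> rfl

-- the fold from a `some` accumulator, characterised by A's two loops
theorem pvFold_some_eq (file_name data_id : String) :
    ∀ (rs : List (List (String × String))) (m : List (String × String)),
      List.foldl (pvStep file_name data_id) (some m) rs =
      some (match pvALoop1 data_id rs with
        | some r => if pvRank file_name data_id m = 0 then m else r
        | none =>
          match pvALoop2 file_name rs with
          | some r => if pvRank file_name data_id m ≤ 1 then m else r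
          | none => m) := by
  intro rs
  induction rs with
  | nil => intro m; simp [pvALoop1, pvALoop2]
  | cons r rest ih =>
    intro m
    simp only [List.foldl]
    by_cases hid : PySem.Dict.get? (⟨r⟩ : PySem.Dict String String) "data_id" == some data_id
    · have hr : pvRank file_name data_id r = 0 := by simp [pvRank, hid]
      by_cases hm : pvRank file_name data_id m = 0
      · have hs : pvStep file_name data_id (some m) r = some m := by
          simp [pvStep, hr, hm]
        rw [hs, ih]
        simp only [pvALoop1, hid, if_pos]
        cases h1 : pvALoop1 data_id rest with
        | some r' => simp [hm]
        | none =>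
          cases h2 : pvALoop2 file_name rest with
          | some r' => simp [hm]
          | none => simp [hm]
      · have hs : pvStep file_name data_id (some m) r = some r := by
          simp [pvStep, hr]; omega
        rw [hs, ih]
        simp only [pvALoop1, hid, if_pos, hm, if_neg]
        cases pvALoop1 data_id rest with
        | some r' => simp [hr]
        | none =>
          cases pvALoop2 file_name rest with
          | some r' => simp [hr]
          | none => simp [hr]
    · by_cases hfn : PySem.Dict.get? (⟨r⟩ : PySem.Dict String String) "file_name" == some file_name
      · have hr : pvRank file_name data_id r = 1 := by simp [pvRank, hid, hfn]
        by_cases hm : pvRank file_name data_id m ≤ 1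
        · have hs : pvStep file_name data_id (some m) r = some m := by
            simp [pvStep, hr]; omega
          rw [hs, ih]
          simp only [pvALoop1, pvALoop2, hid, hfn, if_neg, if_pos,
            Bool.not_eq_true] at *
          cases h1 : pvALoop1 data_id rest with
          | some r' => simp [hid, h1]
          | none =>
            cases h2 : pvALoop2 file_name rest with
            | some r' => simp [hid, hfn, h1, h2, hm]
            | none => simp [hid, hfn, h1, h2, hm]
        · have hs : pvStep file_name data_id (some m) r = some r := by
            simp [pvStep, hr]; omega
          rw [hs, ih]
          have hm0 : ¬ pvRank file_name data_id m = 0 := by omega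
          cases h1 : pvALoop1 data_id rest with
          | some r' => simp [pvALoop1, hid, h1, hm0, hr]
          | none =>
            cases h2 : pvALoop2 file_name rest with
            | some r' => simp [pvALoop1, pvALoop2, hid, hfn, h1, h2, hr, hm, hm0]
            | none => simp [pvALoop1, pvALoop2, hid, hfn, h1, h2, hr, hm, hm0]
      · have hr : pvRank file_name data_id r = 2 := by simp [pvRank, hid, hfn]
        have hmle : pvRank file_name data_id m ≤ 2 := by
          unfold pvRank; split_ifs <;> omega
        have hs : pvStep file_name data_id (some m) r = some m := by
          simp [pvStep, hr]; omega
        rw [hs, ih]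
        simp [pvALoop1, pvALoop2, hid, hfn]

-- ===== VERDICT (by name: the statement is the Claim_ definition above) =====
theorem match_result_py_spec : Claim_equal_match_result_py := by
  intro results file_name data_id _
  unfold Spec_match_result_py match_result_py match_result_py_alt
  cases results with
  | nil => simp [pvALoop1, pvALoop2]
  | cons h t =>
    rw [min?_eq_foldl_pvStep]
    simp only [List.isEmpty_cons, List.foldl]
    have hs0 : pvStep file_name data_id none h = some h := rfl
    rw [if_neg (by simp), hs0, pvFold_some_eq]
    by_cases hid : PySem.Dict.get? (⟨h⟩ : PySem.Dict String String) "data_id" == some data_id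
    · have hr : pvRank file_name data_id h = 0 := by simp [pvRank, hid]
      simp only [pvALoop1, hid, if_pos, hr, if_neg]
      cases pvALoop1 data_id t with
      | some r => simp
      | none =>
        cases pvALoop2 file_name t with
        | some r => simp
        | none => simp
    · by_cases hfn : PySem.Dict.get? (⟨h⟩ : PySem.Dict String String) "file_name" == some file_name
      · have hr : pvRank file_name data_id h = 1 := by simp [pvRank, hid, hfn]
        cases h1 : pvALoop1 data_id t with
        | some r => simp [pvALoop1, hid, h1, hr]
        | none =>
          cases h2 : pvALoop2 file_name t with
          | some r => simp [pvALoop1, pvALoop2, hid, hfn, h1, h2, hr]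
          | none => simp [pvALoop1, pvALoop2, hid, hfn, h1, h2, hr]
      · have hr : pvRank file_name data_id h = 2 := by simp [pvRank, hid, hfn]
        cases h1 : pvALoop1 data_id t with
        | some r => simp [pvALoop1, hid, h1, hr]
        | none =>
          cases h2 : pvALoop2 file_name t with
          | some r => simp [pvALoop1, pvALoop2, hid, hfn, h1, h2, hr]
          | none => simp [pvALoop1, pvALoop2, hid, hfn, h1, h2, hr]
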